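-- pv_equiv track=rewrite | github.com/Junhyung-Choi/SSA | algostack.py | evalStack
-- ===== SOURCE A (Python) =====
-- INF = 123456789
--
-- graph = [
--     [ 0,-1, 0, 1, 1],
--     [ 0,-1,-1, 1, 1],
--     [ 0,-1,-1,-1,-1],
--     [ 0,-1,-1,-1,-1],
--     [ 0, 0, 0, 0, 0]
-- ]
--
-- def itoc(i):
--     return i // 5, i % 5
--
-- def evalStack(stack):
--     if (stack[0] == -1):
--         return -INF
--     sx,sy = itoc(stack[0])
--     score = 0
--     visited_red = [0] * 25
--     if graph[sx][sy] == 1: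
--         score += 5
--         visited_red[stack[0]] = True
--     elif graph[sx][sy] == -1:
--         score -= 5
--     for i in range(1,len(stack)):
--         score -= 1
--         x,y = itoc(stack[i])
--         if graph[x][y] == 1:
--             if (visited_red[stack[i]] == 1):
--                 score -= 5
--             else:
--                 visited_red[stack[i]] = 1
--                 score += 5
--         elif graph[x][y] == -1:
--             score -= 5
--     return score
-- ===== SOURCE B (Python) =====
-- INF = 123456789
--
-- graph = [
--     [ 0,-1, 0, 1, 1],
--     [ 0,-1,-1, 1, 1],
--     [ 0,-1,-1,-1,-1],
--     [ 0,-1,-1,-1,-1],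
--     [ 0, 0, 0, 0, 0]
-- ]
--
-- def evalStack(stack):
--     if stack[0] == -1:
--         return -INF
--     counts = {}
--     for v in stack:
--         u = v % 25
--         counts[u] = counts.get(u, 0) + 1
--     score = -(len(stack) - 1)
--     for u, c in counts.items():
--         cell = graph[u // 5][u % 5]
--         if cell == -1:
--             score -= 5 * c
--         elif cell == 1:
--             score += 10 - 5 * c
--     return score
-- ===== Notes on version B (the rewrite author's own statement) =====
-- stated objective: alternative
-- what changed: Replaces the per-element walk with a visited_red array by a frequency-map pass: count occurrences of each normalized cell v%25 once, then score each DISTINCT cell from its count (red cell contributes 10-5*c, trap cell -5*c) on top of a closed-form step penalty -(len-1).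
import Mathlib
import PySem

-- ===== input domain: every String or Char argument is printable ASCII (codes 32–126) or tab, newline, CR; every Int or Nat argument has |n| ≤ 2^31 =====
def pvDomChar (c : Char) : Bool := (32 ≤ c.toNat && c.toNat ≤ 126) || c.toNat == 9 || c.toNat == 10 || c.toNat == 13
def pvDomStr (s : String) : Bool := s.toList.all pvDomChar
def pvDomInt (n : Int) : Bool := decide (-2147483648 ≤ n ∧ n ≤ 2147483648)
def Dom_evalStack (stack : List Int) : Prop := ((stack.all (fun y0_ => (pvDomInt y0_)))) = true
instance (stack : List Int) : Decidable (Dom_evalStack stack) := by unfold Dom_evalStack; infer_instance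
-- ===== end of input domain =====

-- B replaces A's per-element visited-array walk by a count-table-then-distinct-cells pass; return value only, no mutation.

def INF : Int := 123456789

def pyGraph : List (List Int) :=
  [[0,-1,0,1,1],[0,-1,-1,1,1],[0,-1,-1,-1,-1],[0,-1,-1,-1,-1],[0,0,0,0,0]]

def itoc (i : Int) : Int × Int := (PySem.Int.floordiv i 5, PySem.Int.mod i 5)

-- graph[x][y]; total form of the double index, exact under Pre_ (indices in range)
def graphAt (x y : Int) : Int :=
  PySem.List.pyGetD (PySem.List.pyGetD pyGraph x []) y 0

-- ===== PORT A =====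
-- loop body of 'for i in range(1,len(stack))', folded over the same values stack[1:];
-- visited_red stores 1 where Python stores True/1 (Python's 'True == 1' holds)
def evalStackStep (st : Int × List Int) (v : Int) : Int × List Int :=
  let score := st.1 - 1
  let x := (itoc v).1
  let y := (itoc v).2
  if graphAt x y = 1 then
    if PySem.List.pyGetD st.2 v 0 = 1 then (score - 5, st.2)
    else (score + 5, PySem.List.pySetD st.2 v 1)
  else if graphAt x y = -1 then (score - 5, st.2)
  else (score, st.2)

def evalStack (stack : List Int) : Int :=
  match stack with
  | [] => 0  -- stack[0] raises IndexError; outside Pre_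
  | s0 :: rest =>
    if s0 = -1 then -INF
    else
      let sx := (itoc s0).1
      let sy := (itoc s0).2
      let visited : List Int := List.replicate 25 0
      let st : Int × List Int :=
        if graphAt sx sy = 1 then (5, PySem.List.pySetD visited s0 1)
        else if graphAt sx sy = -1 then (-5, visited)
        else (0, visited)
      (rest.foldl evalStackStep st).1

-- ===== PORT B =====
-- graph[u // 5][u % 5] of Source B
def cellOf (u : Int) : Int := graphAt (PySem.Int.floordiv u 5) (PySem.Int.mod u 5)

def evalStack_alt (stack : List Int) : Int :=
  match stack with
  | [] => 0  -- stack[0] raises IndexError; outside Pre_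
  | s0 :: _ =>
    if s0 = -1 then -INF
    else
      let counts : PySem.Dict Int Int :=
        stack.foldl
          (fun d v => d.insert (PySem.Int.mod v 25) (d.getD (PySem.Int.mod v 25) 0 + 1))
          PySem.Dict.empty
      let base : Int := -((stack.length : Int) - 1)
      counts.items.foldl
        (fun score uc =>
          if cellOf uc.1 = -1 then score - 5 * uc.2
          else if cellOf uc.1 = 1 then score + (10 - 5 * uc.2)
          else score) base

-- ===== PRECONDITION & SPEC =====
-- Pre_ excludes exactly the inputs where the Python A raises IndexError: the empty list
-- (stack[0]) and, unless the first element is -1 (early return), any element below -25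
-- or above 24 (graph[x] raises). A returns on everything Pre_ admits.
def Pre_evalStack (stack : List Int) : Prop :=
  stack ≠ [] ∧ (stack.head? = some (-1) ∨ ∀ v ∈ stack, -25 ≤ v ∧ v ≤ 24)
instance (stack : List Int) : Decidable (Pre_evalStack stack) := by unfold Pre_evalStack; infer_instance

def pvWitness_evalStack : List Int := [3, 7, 3, -22]

def Spec_evalStack (stack : List Int) (out : Int) : Prop := out = evalStack_alt stack
instance (stack : List Int) (out : Int) : Decidable (Spec_evalStack stack out) := by unfold Spec_evalStack; infer_instance

-- ===== CLAIM (what is proved, stated in full; the proofs are below) =====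
def Claim_equal_evalStack : Prop := ∀ (stack : List Int), Dom_evalStack stack → Pre_evalStack stack → Spec_evalStack stack (evalStack stack)


-- ===== LEMMAS AND PROOFS =====

-- normalized cell id of a stack value (v % 25 in Python)
def nrm (v : Int) : Int := PySem.Int.mod v 25

-- indicator list: the visited_red array whose 1-entries are exactly S
def V (S : List Int) : List Int :=
  (List.range 25).map (fun j : Nat => if (j : Int) ∈ S then (1 : Int) else 0)

-- per-element base penalty of a cell
def pen (u : Int) : Int := if cellOf u = 1 ∨ cellOf u = -1 then -5 else 0

-- sequential first-visit scoring (step penalty folded in)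
def specLoop : List Int → List Int → Int
  | [], _ => 0
  | u :: t, S =>
    if cellOf u = 1 then
      if u ∈ S then -6 + specLoop t S else 4 + specLoop t (u :: S)
    else if cellOf u = -1 then -6 + specLoop t S
    else -1 + specLoop t S

lemma nrm_bounds (v : Int) : 0 ≤ nrm v ∧ nrm v < 25 :=
  ⟨PySem.Int.mod_nonneg v (by norm_num), PySem.Int.mod_lt v (by norm_num)⟩

lemma pyIdx_wrap (v : Int) (h1 : -25 ≤ v) (h2 : v < 25) :
    PySem.List.pyIdx? 25 v = some (nrm v).toNat := by
  unfold nrm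
  rw [PySem.Int.mod_eq_emod_of_pos (by norm_num)]
  simp only [PySem.List.pyIdx?]
  split_ifs with ha hb hc
  · congr 1; omega
  · simp at hb; omega
  · congr 1; omega
  · simp at hc; omega

lemma cellA_eq (v : Int) (h1 : -25 ≤ v) (h2 : v ≤ 24) :
    graphAt (itoc v).1 (itoc v).2 = cellOf (nrm v) := by
  interval_cases v <;> decide

lemma pyGetD_wrap (xs : List Int) (hl : xs.length = 25) (v : Int)
    (h1 : -25 ≤ v) (h2 : v < 25) (d : Int) :
    PySem.List.pyGetD xs v d = xs.getD (nrm v).toNat d := by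
  simp only [PySem.List.pyGetD, PySem.List.pyGet?, hl, pyIdx_wrap v h1 h2,
    Option.bind_some, List.getD_eq_getElem?_getD]

lemma pySetD_wrap (xs : List Int) (hl : xs.length = 25) (v : Int)
    (h1 : -25 ≤ v) (h2 : v < 25) (w : Int) :
    PySem.List.pySetD xs v w = xs.set (nrm v).toNat w := by
  simp only [PySem.List.pySetD, PySem.List.pySet?, hl, pyIdx_wrap v h1 h2,
    Option.map_some, Option.getD_some]

lemma V_length (S : List Int) : (V S).length = 25 := by simp [V]

lemma V_get (S : List Int) (u : Nat) (hu : u < 25) :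
    (V S).getD u 0 = if (u : Int) ∈ S then 1 else 0 := by
  have h25 : u < (V S).length := by simp [V]; omega
  rw [List.getD_eq_getElem?_getD, List.getElem?_eq_getElem h25, Option.getD_some]
  unfold V
  rw [List.getElem_map, List.getElem_range]

lemma V_set (S : List Int) (u : Nat) (hu : u < 25) :
    (V S).set u 1 = V ((u : Int) :: S) := by
  apply List.ext_getElem
  · simp [V]
  · intro i hi1 hi2
    simp only [V, List.length_set, List.length_map, List.length_range] at hi1 hi2 ⊢
    rw [List.getElem_set]
    by_cases h : u = i
    · subst h
      rw [if_pos rfl]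
      unfold V
      rw [List.getElem_map, List.getElem_range]
      simp
    · rw [if_neg h]
      unfold V
      rw [List.getElem_map, List.getElem_map, List.getElem_range]
      have : ¬ ((i : Int) = (u : Int)) := by exact_mod_cast fun hh => h (by exact_mod_cast hh.symm)
      simp [List.mem_cons, this]

lemma V_nil : V [] = List.replicate 25 0 := by decide

-- A's loop equals the sequential spec
lemma foldlA (l : List Int) (S : List Int) (sc : Int)
    (hl : ∀ v ∈ l, -25 ≤ v ∧ v ≤ 24) :
    (l.foldl evalStackStep (sc, V S)).1 = sc + specLoop (l.map nrm) S := by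
  induction l generalizing S sc with
  | nil => simp [specLoop]
  | cons v t ih =>
    obtain ⟨hv1, hv2⟩ := hl v (List.mem_cons_self ..)
    have ht : ∀ w ∈ t, -25 ≤ w ∧ w ≤ 24 := fun w hw => hl w (List.mem_cons_of_mem _ hw)
    have hb := nrm_bounds v
    have hcast : ((nrm v).toNat : Int) = nrm v := Int.toNat_of_nonneg hb.1
    simp only [List.foldl_cons, List.map_cons, specLoop, evalStackStep]
    rw [cellA_eq v hv1 hv2,
      pyGetD_wrap _ (V_length S) v hv1 (by omega),
      pySetD_wrap _ (V_length S) v hv1 (by omega),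
      V_get S (nrm v).toNat (by omega), V_set S (nrm v).toNat (by omega), hcast]
    by_cases hc1 : cellOf (nrm v) = 1
    · by_cases hm : nrm v ∈ S
      · simp [hc1, hm]
        rw [ih _ _ ht]
        ring
      · simp [hc1, hm]
        rw [ih _ _ ht]
        ring
    · by_cases hc2 : cellOf (nrm v) = -1
      · simp [hc1, hc2]
        rw [ih _ _ ht]
        ring
      · simp [hc1, hc2]
        rw [ih _ _ ht]
        ring

-- sequential spec in closed form
lemma specLoop_char (L : List Int) (S : List Int) :
    specLoop L S = -(L.length : Int) + (L.map pen).sum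
      + 10 * (((L.toFinset.filter (fun u => cellOf u = 1 ∧ u ∉ S)).card : Int)) := by
  induction L generalizing S with
  | nil => simp [specLoop]
  | cons u t ih =>
    simp only [specLoop, List.toFinset_cons, Finset.filter_insert, List.map_cons,
      List.sum_cons, List.length_cons, pen]
    by_cases hc1 : cellOf u = 1
    · by_cases hm : u ∈ S
      · rw [if_pos hc1, if_pos hm, if_neg (show ¬(cellOf u = 1 ∧ u ∉ S) by simp [hm]), ih S,
          if_pos (show cellOf u = 1 ∨ cellOf u = -1 from Or.inl hc1)]
        push_cast
        ring
      · rw [if_pos hc1, if_neg hm, if_pos (show cellOf u = 1 ∧ u ∉ S from ⟨hc1, hm⟩), ih (u :: S),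
          if_pos (show cellOf u = 1 ∨ cellOf u = -1 from Or.inl hc1)]
        have h1 : t.toFinset.filter (fun x => cellOf x = 1 ∧ x ∉ u :: S)
            = (t.toFinset.filter (fun x => cellOf x = 1 ∧ x ∉ S)).erase u := by
          ext x
          simp only [Finset.mem_filter, Finset.mem_erase, List.mem_cons]
          tauto
        have h2 : insert u (t.toFinset.filter (fun x => cellOf x = 1 ∧ x ∉ S))
            = insert u ((t.toFinset.filter (fun x => cellOf x = 1 ∧ x ∉ S)).erase u) := by
          ext x
          simp only [Finset.mem_insert, Finset.mem_erase]
          tauto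
        rw [h2, Finset.card_insert_of_notMem (Finset.notMem_erase _ _), ← h1]
        push_cast
        ring
    · have hred : ¬ (cellOf u = 1 ∧ u ∉ S) := fun h => hc1 h.1
      by_cases hc2 : cellOf u = -1
      · rw [if_neg hc1, if_pos hc2, if_neg hred, ih S,
          if_pos (show cellOf u = 1 ∨ cellOf u = -1 from Or.inr hc2)]
        push_cast
        ring
      · rw [if_neg hc1, if_neg hc2, if_neg hred, ih S,
          if_neg (show ¬(cellOf u = 1 ∨ cellOf u = -1) by tauto)]
        push_cast
        ring

-- B in closed form
lemma altB_char (s0 : Int) (rest : List Int) (hs0 : ¬ s0 = -1) :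
    evalStack_alt (s0 :: rest)
      = -((rest.length : Int))
        + (((s0 :: rest).map nrm).map pen).sum
        + 10 * (((((s0 :: rest).map nrm).toFinset.filter (fun u => cellOf u = 1)).card : Int)) := by
  have hcnt : (s0 :: rest).foldl
      (fun (d : PySem.Dict Int Int) v => d.insert (PySem.Int.mod v 25) (d.getD (PySem.Int.mod v 25) 0 + 1))
      PySem.Dict.empty = PySem.Dict.counter ((s0 :: rest).map nrm) := by
    rw [← PySem.Dict.foldl_insert_getD_add_one_eq_counter, List.foldl_map]
    rfl
  simp only [evalStack_alt, if_neg hs0]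
  rw [hcnt, PySem.Dict.items_counter, List.foldl_map]
  rw [PySem.List.foldl_congr_mem' _ _
    (fun score k => score + (pen k * ((((s0 :: rest).map nrm).count k : Int))
      + if cellOf k = 1 then (10:Int) else 0)) _ ?hcong]
  case hcong =>
    intro k _ acc
    by_cases hc1 : cellOf k = 1
    · simp [pen, hc1]
      ring
    · by_cases hc2 : cellOf k = -1
      · simp [pen, hc1, hc2]
        ring
      · simp [pen, hc1, hc2]
  rw [PySem.List.foldl_add]
  rw [← List.sum_toFinset _ (PySem.Set.nodup_ofList ((s0 :: rest).map nrm))]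
  have hfs : (PySem.Set.ofList ((s0 :: rest).map nrm)).toFinset = ((s0 :: rest).map nrm).toFinset := by
    ext x
    simp [List.mem_toFinset, PySem.Set.mem_ofList]
  rw [hfs, Finset.sum_add_distrib]
  have hpc : (∑ u ∈ ((s0 :: rest).map nrm).toFinset, pen u * ((((s0 :: rest).map nrm).count u : Int)))
      = (((s0 :: rest).map nrm).map pen).sum := by
    rw [Finset.sum_list_map_count]
    apply Finset.sum_congr rfl
    intro x _
    rw [nsmul_eq_mul]
    ring
  have hite : (∑ u ∈ ((s0 :: rest).map nrm).toFinset, if cellOf u = 1 then (10:Int) else 0)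
      = 10 * (((((s0 :: rest).map nrm).toFinset.filter (fun u => cellOf u = 1)).card : Int)) := by
    rw [← Finset.sum_filter, Finset.sum_const, nsmul_eq_mul]
    ring
  rw [hpc, hite]
  simp only [List.length_cons]
  push_cast
  ring

-- ===== VERDICT (by name: the statement is the Claim_ definition above) =====
theorem evalStack_spec : Claim_equal_evalStack := by
  intro stack _ hpre
  unfold Spec_evalStack
  obtain ⟨hne, hp⟩ := hpre
  cases stack with
  | nil => exact absurd rfl hne
  | cons s0 rest =>
    by_cases hs0 : s0 = -1
    · subst hs0
      simp [evalStack, evalStack_alt]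
    · have hall : ∀ v ∈ s0 :: rest, -25 ≤ v ∧ v ≤ 24 := by
        rcases hp with h | h
        · simp only [List.head?_cons, Option.some.injEq] at h
          exact absurd h hs0
        · exact h
      obtain ⟨h01, h02⟩ := hall s0 (List.mem_cons_self ..)
      have ht : ∀ w ∈ rest, -25 ≤ w ∧ w ≤ 24 := fun w hw => hall w (List.mem_cons_of_mem _ hw)
      have hb := nrm_bounds s0
      have hcast : ((nrm s0).toNat : Int) = nrm s0 := Int.toNat_of_nonneg hb.1
      have hAinit : evalStack (s0 :: rest)
          = ((if cellOf (nrm s0) = 1 then (List.foldl evalStackStep (5, V [nrm s0]) rest).1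
              else if cellOf (nrm s0) = -1 then (List.foldl evalStackStep (-5, V []) rest).1
              else (List.foldl evalStackStep (0, V []) rest).1)) := by
        simp only [evalStack, if_neg hs0]
        rw [cellA_eq s0 h01 h02, ← V_nil,
          pySetD_wrap _ (V_length []) s0 h01 (by omega),
          V_set [] (nrm s0).toNat (by omega), hcast]
        by_cases hc1 : cellOf (nrm s0) = 1
        · rw [if_pos hc1, if_pos hc1]
        · rw [if_neg hc1, if_neg hc1]
          by_cases hc2 : cellOf (nrm s0) = -1
          · rw [if_pos hc2, if_pos hc2]
          · rw [if_neg hc2, if_neg hc2]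
      rw [hAinit, altB_char s0 rest hs0, List.map_cons, List.toFinset_cons, List.map_cons,
        List.sum_cons, Finset.filter_insert]
      by_cases hc1 : cellOf (nrm s0) = 1
      · rw [if_pos hc1, if_pos hc1, foldlA rest [nrm s0] 5 ht, specLoop_char]
        have h1 : (rest.map nrm).toFinset.filter (fun u => cellOf u = 1 ∧ u ∉ [nrm s0])
            = ((rest.map nrm).toFinset.filter (fun u => cellOf u = 1)).erase (nrm s0) := by
          ext x
          simp only [Finset.mem_filter, Finset.mem_erase, List.mem_singleton]
          tauto
        have h2 : insert (nrm s0) ((rest.map nrm).toFinset.filter (fun u => cellOf u = 1))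
            = insert (nrm s0) (((rest.map nrm).toFinset.filter (fun u => cellOf u = 1)).erase (nrm s0)) := by
          ext x
          simp only [Finset.mem_insert, Finset.mem_erase]
          tauto
        have hpen : pen (nrm s0) = -5 := by simp [pen, hc1]
        rw [h1, h2, Finset.card_insert_of_notMem (Finset.notMem_erase _ _), hpen]
        simp only [List.length_map]
        push_cast
        ring
      · have hfil : (rest.map nrm).toFinset.filter (fun u => cellOf u = 1 ∧ u ∉ ([] : List Int))
            = (rest.map nrm).toFinset.filter (fun u => cellOf u = 1) := by
          ext x
          simp
        rw [if_neg hc1, if_neg hc1]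
        by_cases hc2 : cellOf (nrm s0) = -1
        · rw [if_pos hc2, foldlA rest [] (-5) ht, specLoop_char, hfil,
            show pen (nrm s0) = -5 by simp [pen, hc2]]
          simp only [List.length_map]
          push_cast
          ring
        · rw [if_neg hc2, foldlA rest [] 0 ht, specLoop_char, hfil,
            show pen (nrm s0) = 0 by simp [pen, hc1, hc2]]
          simp only [List.length_map]
          push_cast
          ring
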